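-- pv_equiv track=rewrite | github.com/JonathanHuangg/ForFun | questionSet1.py | highlyProfitableMonths
-- ===== SOURCE A (Python) =====
-- def highlyProfitableMonths(stockPrices, k):
--     index = 1
--     inaRow = 0
--     count = 0
--     while index < len(stockPrices):
--         if stockPrices[index] > stockPrices[index - 1]:
--             inaRow += 1
--             if inaRow == k - 1:
--                 count += 1
--                 inaRow -= 1
--         else:
--             inaRow = 0
--         index += 1
--     return count
-- ===== SOURCE B (Python) =====
-- def highlyProfitableMonths(stockPrices, k):
--     # Brute force over window starts: test every length-k window of prices
--     # directly for strict increase (nested scan instead of a streak counter).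
--     if k < 2:
--         return 0
--     n = len(stockPrices)
--     count = 0
--     for i in range(n - k + 1):
--         if all(stockPrices[j] < stockPrices[j + 1] for j in range(i, i + k - 1)):
--             count += 1
--     return count
-- ===== Notes on version B (the rewrite author's own statement) =====
-- stated objective: alternative
-- what changed: A makes one pass with a streak counter and a decrement trick; B enumerates every window start and tests the whole window with a nested scan (brute force), trading speed for directness.
import Mathlib
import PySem

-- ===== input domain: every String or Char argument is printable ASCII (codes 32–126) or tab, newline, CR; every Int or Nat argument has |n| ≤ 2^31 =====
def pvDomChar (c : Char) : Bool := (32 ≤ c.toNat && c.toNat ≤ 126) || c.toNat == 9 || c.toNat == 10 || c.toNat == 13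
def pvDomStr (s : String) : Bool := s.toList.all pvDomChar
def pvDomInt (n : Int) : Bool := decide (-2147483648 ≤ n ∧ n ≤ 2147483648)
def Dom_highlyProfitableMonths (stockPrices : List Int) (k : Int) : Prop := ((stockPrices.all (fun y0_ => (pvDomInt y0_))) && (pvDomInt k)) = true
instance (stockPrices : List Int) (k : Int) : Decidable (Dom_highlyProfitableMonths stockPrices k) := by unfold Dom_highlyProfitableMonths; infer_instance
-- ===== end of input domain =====

-- B replaces A's single-pass streak counter by a brute-force enumeration of every
-- window start with a nested per-window scan (objective: alternative; B is not faster).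

-- ===== PORT A =====
-- while-loop of A as recursion on the index; the list is only indexed at
-- positions 1 ≤ index < length, where pyGetD is exact (the default 0 is never used).
def highlyProfitableMonthsGo (stockPrices : List Int) (k : Int) (index : Nat) (inaRow count : Int) : Int :=
  if index < stockPrices.length then
    if PySem.List.pyGetD stockPrices (index : Int) 0 > PySem.List.pyGetD stockPrices ((index : Int) - 1) 0 then
      if inaRow + 1 == k - 1 then
        highlyProfitableMonthsGo stockPrices k (index + 1) (inaRow + 1 - 1) (count + 1)
      else
        highlyProfitableMonthsGo stockPrices k (index + 1) (inaRow + 1) count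
    else
      highlyProfitableMonthsGo stockPrices k (index + 1) 0 count
  else count
termination_by stockPrices.length - index

def highlyProfitableMonths (stockPrices : List Int) (k : Int) : Int :=
  highlyProfitableMonthsGo stockPrices k 1 0 0

-- ===== PORT B =====
-- brute force from Source B: for i in range(n-k+1): if all(prices[j] < prices[j+1]
-- for j in range(i, i+k-1)): count += 1.  All indexing is in range, so pyGetD is exact.
def highlyProfitableMonths_alt (stockPrices : List Int) (k : Int) : Int :=
  if k < 2 then 0
  else
    (PySem.List.pyRange 0 ((stockPrices.length : Int) - k + 1) 1).foldl
      (fun count i =>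
        if (PySem.List.pyRange i (i + k - 1) 1).all
            (fun j => PySem.List.pyGetD stockPrices j 0 < PySem.List.pyGetD stockPrices (j + 1) 0)
        then count + 1 else count)
      0

-- ===== PRECONDITION & SPEC =====
def Spec_highlyProfitableMonths (stockPrices : List Int) (k : Int) (out : Int) : Prop := out = highlyProfitableMonths_alt stockPrices k
instance (stockPrices : List Int) (k : Int) (out : Int) : Decidable (Spec_highlyProfitableMonths stockPrices k out) := by unfold Spec_highlyProfitableMonths; infer_instance

-- ===== CLAIM (what is proved, stated in full; the proofs are below) =====
def Claim_equal_highlyProfitableMonths : Prop := ∀ (stockPrices : List Int) (k : Int), Dom_highlyProfitableMonths stockPrices k → Spec_highlyProfitableMonths stockPrices k (highlyProfitableMonths stockPrices k)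

-- ===== LEMMAS AND PROOFS =====

-- A's loop re-expressed as a recursion over the list of adjacent pairs
def countA (k inaRow count : Int) : List (Int × Int) → Int
  | [] => count
  | p :: ps =>
    if p.2 > p.1 then
      if inaRow + 1 = k - 1 then countA k (inaRow + 1 - 1) (count + 1) ps
      else countA k (inaRow + 1) count ps
    else countA k 0 count ps

-- A's loop as a fold with an UNCLAMPED streak in the state: .1 = count, .2 = streak
def stepW (k : Int) (st : Int × Int) (p : Int × Int) : Int × Int :=
  if p.2 > p.1 then (st.1 + (if st.2 + 1 ≥ k - 1 then 1 else 0), st.2 + 1) else (st.1, 0)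

-- number of increases at the front of a pair list
def leadInc : List (Int × Int) → Nat
  | [] => 0
  | p :: ps => if p.1 < p.2 then leadInc ps + 1 else 0

-- number of increases at the back of a pair list
def trailInc (ps : List (Int × Int)) : Nat := leadInc ps.reverse

-- window count by B's definition, as a head recursion over the pair list:
-- a window of d pairs starts at every position, counted if all d pairs increase
def countB (d : Nat) : List (Int × Int) → Int
  | [] => 0
  | p :: ps =>
    (if d ≤ ps.length + 1 ∧ ((p :: ps).take d).all (fun q => q.1 < q.2) then 1 else 0)
      + countB d ps

lemma go_eq_countA (xs : List Int) (k : Int) :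
    ∀ (index : Nat) (inaRow count : Int), 1 ≤ index →
      highlyProfitableMonthsGo xs k index inaRow count
        = countA k inaRow count ((xs.zip xs.tail).drop (index - 1)) := by
  intro index inaRow count h1
  induction hfuel : xs.length - index generalizing index inaRow count with
  | zero =>
    rw [highlyProfitableMonthsGo]
    have hge : xs.length ≤ index := by omega
    have hdrop : ((xs.zip xs.tail).drop (index - 1)) = [] := by
      apply List.drop_eq_nil_of_le
      have := List.length_zip (l₁ := xs) (l₂ := xs.tail)
      simp [List.length_tail] at this ⊢
      omega
    simp [hdrop, countA, Nat.not_lt.mpr hge]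
  | succ m ih =>
    rw [highlyProfitableMonthsGo]
    have hlt : index < xs.length := by omega
    have hzl : (xs.zip xs.tail).length = xs.length - 1 := by
      simp [List.length_tail]
    have hidx : index - 1 < (xs.zip xs.tail).length := by omega
    have hdrop : (xs.zip xs.tail).drop (index - 1)
        = (xs.zip xs.tail)[index - 1] :: (xs.zip xs.tail).drop (index - 1 + 1) := by
      exact List.drop_eq_getElem_cons hidx
    have hpair : (xs.zip xs.tail)[index - 1] = (xs[index - 1]'(by omega), xs[index]'hlt) := by
      have h2 : index - 1 < xs.tail.length := by simp [List.length_tail]; omega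
      simp [List.getElem_zip, List.getElem_tail]
      congr 1
      omega
    have hg1 : PySem.List.pyGetD xs (index : Int) 0 = xs[index]'hlt := by
      rw [PySem.List.pyGetD_natCast]
      exact List.getD_eq_getElem xs 0 hlt
    have hg2 : PySem.List.pyGetD xs ((index : Int) - 1) 0 = xs[index - 1]'(by omega) := by
      have hcast : (index : Int) - 1 = ((index - 1 : Nat) : Int) := by omega
      rw [hcast, PySem.List.pyGetD_natCast]
      exact List.getD_eq_getElem xs 0 (by omega)
    rw [hg1, hg2, hdrop, hpair]
    have hsucc : index + 1 - 1 = index - 1 + 1 := by omega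
    by_cases hc : xs[index]'hlt > xs[index - 1]'(by omega)
    · by_cases he : inaRow + 1 = k - 1
      · have ihx := ih (index + 1) (inaRow + 1 - 1) (count + 1) (by omega) (by omega)
        rw [hsucc, he] at ihx
        simp [hlt, hc, he, countA, ihx]
      · have ihx := ih (index + 1) (inaRow + 1) count (by omega) (by omega)
        rw [hsucc] at ihx
        simp [hlt, hc, he, countA, ihx]
    · have ihx := ih (index + 1) 0 count (by omega) (by omega)
      rw [hsucc] at ihx
      simp [hlt, hc, countA, ihx]

lemma countA_small (k : Int) (hk : k < 2) :
    ∀ (ps : List (Int × Int)) (inaRow count : Int), 0 ≤ inaRow →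
      countA k inaRow count ps = count := by
  intro ps
  induction ps with
  | nil => intro inaRow count _; rfl
  | cons p ps ih =>
    intro inaRow count hge
    have hne : ¬ (inaRow + 1 = k - 1) := by omega
    by_cases hc : p.2 > p.1
    · simp [countA, hc, hne, ih (inaRow + 1) count (by omega)]
    · simp [countA, hc, ih 0 count (by omega)]

-- A's clamped counter computes the same count as the unclamped fold
lemma countA_eq_foldW (k : Int) (hk : 2 ≤ k) :
    ∀ (ps : List (Int × Int)) (r total : Int), 0 ≤ r →
      countA k (min r (k - 2)) total ps = (ps.foldl (stepW k) (total, r)).1 := by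
  intro ps
  induction ps with
  | nil => intro r total _; simp [countA]
  | cons p ps ih =>
    intro r total hr
    by_cases hc : p.2 > p.1
    · by_cases hbig : k - 2 ≤ r
      · have hmin : min r (k - 2) = k - 2 := by omega
        have heq : (k - 2) + 1 = k - 1 := by omega
        have htrig : k - 1 ≤ r + 1 := by omega
        have ihx := ih (r + 1) (total + 1) (by omega)
        rw [show min (r + 1) (k - 2) = k - 2 from by omega] at ihx
        rw [hmin]
        simp only [countA, heq, hc, if_true, List.foldl_cons, stepW, ge_iff_le, htrig]
        rw [show k - 1 - 1 = k - 2 from by omega]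
        exact ihx
      · have hmin : min r (k - 2) = r := by omega
        have hne : ¬ (r + 1 = k - 1) := by omega
        have hnt : ¬ (k - 1 ≤ r + 1) := by omega
        have ihx := ih (r + 1) total (by omega)
        rw [show min (r + 1) (k - 2) = r + 1 from by omega] at ihx
        rw [hmin]
        simp only [countA, hc, if_true, hne, if_false, List.foldl_cons, stepW, ge_iff_le,
          hnt, add_zero]
        exact ihx
    · have ihx := ih 0 total (by omega)
      rw [show min (0 : Int) (k - 2) = 0 from by omega] at ihx
      simp only [countA, hc, if_false, List.foldl_cons, stepW]
      simpa using ihx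

lemma leadInc_le_length (l : List (Int × Int)) : leadInc l ≤ l.length := by
  induction l with
  | nil => simp [leadInc]
  | cons p ps ih =>
    by_cases hc : p.1 < p.2 <;> simp [leadInc, hc] <;> omega

lemma leadInc_append (l₁ l₂ : List (Int × Int)) :
    leadInc (l₁ ++ l₂)
      = if leadInc l₁ = l₁.length then l₁.length + leadInc l₂ else leadInc l₁ := by
  induction l₁ with
  | nil => simp [leadInc]
  | cons x l ih =>
    by_cases hc : x.1 < x.2
    · have hle := leadInc_le_length l
      simp only [List.cons_append, leadInc, hc, if_true, ih, List.length_cons]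
      split_ifs <;> omega
    · simp only [List.cons_append, leadInc, hc, if_false, List.length_cons]
      rw [if_neg (by omega)]

lemma leadInc_eq_length_iff (l : List (Int × Int)) :
    leadInc l = l.length ↔ l.all (fun q => q.1 < q.2) = true := by
  induction l with
  | nil => simp [leadInc]
  | cons p ps ih =>
    have hle := leadInc_le_length ps
    by_cases hc : p.1 < p.2
    · simp only [leadInc, hc, if_true, List.length_cons, List.all_cons, decide_true,
        Bool.true_and, Nat.add_right_cancel_iff, ih]
    · simp only [leadInc, hc, if_false, List.length_cons, List.all_cons, decide_false,
        Bool.false_and, Bool.false_eq_true, iff_false]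
      omega

lemma trailInc_le_length (l : List (Int × Int)) : trailInc l ≤ l.length := by
  have := leadInc_le_length l.reverse
  simpa [trailInc] using this

lemma trailInc_cons (q : Int × Int) (ps : List (Int × Int)) :
    trailInc (q :: ps)
      = if trailInc ps = ps.length then ps.length + (if q.1 < q.2 then 1 else 0)
        else trailInc ps := by
  rw [trailInc, List.reverse_cons, leadInc_append]
  simp only [List.length_reverse]
  rw [trailInc]
  have h1 : leadInc [q] = if q.1 < q.2 then 1 else 0 := by
    by_cases hc : q.1 < q.2 <;> simp [leadInc, hc]
  rw [h1]

lemma trailInc_snoc (ps : List (Int × Int)) (p : Int × Int) :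
    trailInc (ps ++ [p]) = if p.1 < p.2 then trailInc ps + 1 else 0 := by
  simp only [trailInc, List.reverse_append, List.reverse_singleton, List.singleton_append,
    leadInc]

lemma countB_zero_of_lt (d : Nat) :
    ∀ ps : List (Int × Int), ps.length < d → countB d ps = 0 := by
  intro ps
  induction ps with
  | nil => intro _; rfl
  | cons p ps ih =>
    intro h
    simp only [List.length_cons] at h
    rw [countB, if_neg (by omega), ih (by omega)]
    omega

lemma trailInc_eq_length_iff (ps : List (Int × Int)) :
    trailInc ps = ps.length ↔ ps.all (fun q => q.1 < q.2) = true := by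
  rw [trailInc, show ps.length = ps.reverse.length from List.length_reverse.symm,
    leadInc_eq_length_iff, List.all_reverse]

-- KEY LEMMA: appending one pair adds exactly one candidate window, the one ending
-- at the new pair; it counts iff the new pair increases and the trailing streak
-- before it already had d-1 increases.
lemma countB_snoc (d : Nat) (hd : 1 ≤ d) (p : Int × Int) :
    ∀ ps : List (Int × Int),
      countB d (ps ++ [p])
        = countB d ps + (if p.1 < p.2 ∧ d ≤ trailInc ps + 1 then 1 else 0) := by
  intro ps
  induction ps with
  | nil =>
    have h1 : ([p] : List (Int × Int)).take d = [p] := List.take_of_length_le (by simp; omega)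
    simp only [List.nil_append, countB, h1, List.length_nil, List.all_cons, List.all_nil,
      Bool.and_true, trailInc, List.reverse_nil, leadInc]
    by_cases hc : p.1 < p.2 <;> (simp [hc]; try omega)
  | cons q ps ih =>
    have htle := trailInc_le_length ps
    simp only [List.cons_append, countB, ih]
    rw [trailInc_cons]
    by_cases hcase : d ≤ ps.length + 1
    · -- window at q fits already in q :: ps; it is unchanged by appending p
      have ht1 : (q :: (ps ++ [p])).take d = (q :: ps).take d := by
        rw [← List.cons_append]
        exact List.take_append_of_le_length (by simp; omega)
      have hl1 : (d ≤ (ps ++ [p]).length + 1) = True := by simp; omega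
      have hl0 : (d ≤ ps.length + 1) = True := by simp [hcase]
      simp only [ht1, hl1, hl0, true_and]
      have hiff : (p.1 < p.2 ∧ d ≤ trailInc ps + 1)
          ↔ (p.1 < p.2 ∧ d ≤ (if trailInc ps = ps.length
              then ps.length + (if q.1 < q.2 then 1 else 0) else trailInc ps) + 1) := by
        split_ifs <;> (constructor <;> rintro ⟨hp', hdd⟩ <;> exact ⟨hp', by omega⟩)
      simp only [hiff]
      ring
    · by_cases hcase2 : d = ps.length + 2
      · -- the only candidate window of q :: ps ++ [p] is the whole list
        have ht1 : (q :: (ps ++ [p])).take d = q :: (ps ++ [p]) := by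
          rw [← List.cons_append]
          exact List.take_of_length_le (by simp; omega)
        have hl1 : (d ≤ (ps ++ [p]).length + 1) = True := by simp; omega
        have hl0 : ¬ (d ≤ ps.length + 1 ∧ ((q :: ps).take d).all (fun q => q.1 < q.2) = true) := by
          intro h; exact hcase h.1
        have hih : ¬ (p.1 < p.2 ∧ d ≤ trailInc ps + 1) := by
          intro h; omega
        simp only [ht1, hl1, true_and, if_neg hl0, if_neg hih, List.all_cons, List.all_append,
          List.all_nil, Bool.and_true]
        have hiff2 : ((decide (q.1 < q.2) && (ps.all (fun q => q.1 < q.2) && decide (p.1 < p.2))) = true)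
            ↔ (p.1 < p.2 ∧ d ≤ (if trailInc ps = ps.length
                then ps.length + (if q.1 < q.2 then 1 else 0) else trailInc ps) + 1) := by
          simp only [Bool.and_eq_true, decide_eq_true_eq]
          constructor
          · rintro ⟨hq', hall, hp'⟩
            refine ⟨hp', ?_⟩
            rw [if_pos ((trailInc_eq_length_iff ps).mpr hall), if_pos hq']
            omega
          · rintro ⟨hp', hdd⟩
            split_ifs at hdd with h1 h2
            · exact ⟨h2, (trailInc_eq_length_iff ps).mp h1, hp'⟩
            · omega
            · omega
        simp only [hiff2]
        ring
      · -- no candidate window fits at q even after appending p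
        have hT1 : ¬ (d ≤ (ps ++ [p]).length + 1 ∧
            ((q :: (ps ++ [p])).take d).all (fun q => q.1 < q.2) = true) := by
          intro h; have := h.1; simp [List.length_append] at this; omega
        have hT0 : ¬ (d ≤ ps.length + 1 ∧ ((q :: ps).take d).all (fun q => q.1 < q.2) = true) := by
          intro h; exact hcase h.1
        have hih : ¬ (p.1 < p.2 ∧ d ≤ trailInc ps + 1) := by intro h; omega
        have hLt : ¬ (p.1 < p.2 ∧ d ≤ (if trailInc ps = ps.length
            then ps.length + (if q.1 < q.2 then 1 else 0) else trailInc ps) + 1) := by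
          intro h; have := h.2; split_ifs at this <;> omega
        rw [if_neg hT1, if_neg hT0, if_neg hih, if_neg hLt]
        omega

-- the unclamped fold computes (countB, trailing streak)
lemma foldW_eq (k : Int) (hk : 2 ≤ k) (d : Nat) (hd : (d : Int) = k - 1) :
    ∀ ps : List (Int × Int),
      ps.foldl (stepW k) (0, 0) = (countB d ps, (trailInc ps : Int)) := by
  intro ps
  induction ps using List.reverseRecOn with
  | nil => simp [countB, trailInc, leadInc]
  | append_singleton ps p ih =>
    rw [List.foldl_append, ih, List.foldl_cons, List.foldl_nil]
    rw [countB_snoc d (by omega) p ps, trailInc_snoc]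
    by_cases hc : p.2 > p.1
    · have hc' : p.1 < p.2 := hc
      have hiff : ((trailInc ps : Int) + 1 ≥ k - 1) ↔ (p.1 < p.2 ∧ d ≤ trailInc ps + 1) := by
        constructor
        · intro h; exact ⟨hc', by omega⟩
        · rintro ⟨_, h⟩; omega
      rw [stepW, if_pos hc, if_pos hc']
      simp only [hiff, Prod.mk.injEq, true_and]
      push_cast
      ring
    · have hc' : ¬ p.1 < p.2 := hc
      rw [stepW, if_neg hc, if_neg hc', if_neg (fun h => hc' h.1)]
      simp

-- a counting foldl is a countP
lemma pv_foldl_count (Q : Nat → Bool) :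
    ∀ (l : List Nat) (c0 : Int),
      l.foldl (fun c t => if Q t then c + 1 else c) c0 = c0 + ((l.countP Q : Nat) : Int) := by
  intro l
  induction l with
  | nil => intro c0; simp
  | cons a l ih =>
    intro c0
    rw [List.foldl_cons, List.countP_cons, ih]
    by_cases hQ : Q a = true <;> (simp [hQ]; try push_cast; try ring)

-- B's per-start count over List.range equals countB
lemma countP_range_eq_countB (d : Nat) (hd : 1 ≤ d) :
    ∀ ps : List (Int × Int),
      (((List.range (ps.length + 1 - d)).countP
          (fun t => ((ps.drop t).take d).all (fun q => q.1 < q.2)) : Nat) : Int)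
        = countB d ps := by
  intro ps
  induction ps with
  | nil =>
    simp only [List.length_nil, Nat.zero_add, countB]
    rw [show 1 - d = 0 from by omega]
    simp
  | cons p ps ih =>
    by_cases hcase : d ≤ ps.length + 1
    · have hlen : (p :: ps).length + 1 - d = (ps.length + 1 - d) + 1 := by simp; omega
      rw [hlen, List.range_succ_eq_map, List.countP_cons, List.countP_map]
      have hcomp : ((fun t => (((p :: ps).drop t).take d).all (fun q => q.1 < q.2)) ∘ Nat.succ)
          = (fun t => ((ps.drop t).take d).all (fun q => q.1 < q.2)) := by
        funext t
        simp [List.drop_succ_cons]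
      rw [hcomp, countB]
      simp only [List.drop_zero]
      by_cases hA : ((p :: ps).take d).all (fun q => q.1 < q.2) = true <;>
      · simp [hA, hcase]
        push_cast
        omega
    · have hlen : (p :: ps).length + 1 - d = 0 := by simp; omega
      rw [hlen]
      simp only [List.range_zero, List.countP_nil, Nat.cast_zero, countB]
      rw [if_neg (fun h => hcase h.1), countB_zero_of_lt d ps (by omega)]
      omega

-- the window of pairs starting at t is exactly what B's inner scan reads off xs
lemma window_eq (xs : List Int) (t d : Nat) (ht : t + d ≤ (xs.zip xs.tail).length) :
    ((xs.zip xs.tail).drop t).take d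
      = (List.range d).map (fun u : Nat =>
          (PySem.List.pyGetD xs ((t : Int) + (u : Int)) 0,
           PySem.List.pyGetD xs ((t : Int) + (u : Int) + 1) 0)) := by
  have hzl : (xs.zip xs.tail).length = xs.length - 1 := by
    rw [List.length_zip, List.length_tail]; omega
  apply List.ext_getElem
  · simp only [List.length_take, List.length_drop, List.length_map, List.length_range]
    omega
  · intro u h1 h2
    simp only [List.length_take, List.length_drop] at h1
    simp only [List.getElem_take, List.getElem_drop, List.getElem_map, List.getElem_range]
    have hu : t + u < (xs.zip xs.tail).length := by omega
    rw [List.getElem_zip]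
    have hx1 : t + u < xs.length := by omega
    have hx2 : t + u < xs.tail.length := by rw [List.length_tail]; omega
    have e1 : PySem.List.pyGetD xs ((t : Int) + u) 0 = xs[t + u]'hx1 := by
      rw [show (t : Int) + u = ((t + u : Nat) : Int) from by push_cast; ring,
        PySem.List.pyGetD_natCast]
      exact List.getD_eq_getElem xs 0 hx1
    have e2 : PySem.List.pyGetD xs ((t : Int) + u + 1) 0 = xs[t + u + 1]'(by omega) := by
      rw [show (t : Int) + u + 1 = ((t + u + 1 : Nat) : Int) from by push_cast; ring,
        PySem.List.pyGetD_natCast]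
      exact List.getD_eq_getElem xs 0 (by omega)
    rw [e1, e2, List.getElem_tail]

-- B's inner all-scan tests exactly the pair window starting at t
lemma inner_eq (xs : List Int) (k : Int) (d t : Nat) (hd : (d : Int) = k - 1)
    (ht : t + d ≤ (xs.zip xs.tail).length) :
    ((PySem.List.pyRange (t : Int) ((t : Int) + k - 1) 1).all
        (fun j => PySem.List.pyGetD xs j 0 < PySem.List.pyGetD xs (j + 1) 0))
      = (((xs.zip xs.tail).drop t).take d).all (fun q => q.1 < q.2) := by
  rw [PySem.List.pyRange_one]
  rw [show (t : Int) + k - 1 - t = k - 1 from by ring]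
  rw [show (k - 1).toNat = d from by omega]
  rw [window_eq xs t d ht, List.all_map, List.all_map]
  rfl

-- B's port computes countB of the adjacent-pair list
lemma alt_eq_countB (xs : List Int) (k : Int) (hk : 2 ≤ k) (d : Nat) (hd : (d : Int) = k - 1) :
    highlyProfitableMonths_alt xs k = countB d (xs.zip xs.tail) := by
  have hzl : (xs.zip xs.tail).length = xs.length - 1 := by
    rw [List.length_zip, List.length_tail]; omega
  unfold highlyProfitableMonths_alt
  rw [if_neg (by omega)]
  rw [PySem.List.pyRange_one, List.foldl_map]
  have hM : ((xs.length : Int) - k + 1 - 0).toNat = (xs.zip xs.tail).length + 1 - d := by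
    omega
  rw [hM]
  have hmem : ∀ t ∈ List.range ((xs.zip xs.tail).length + 1 - d),
      ((PySem.List.pyRange (0 + (t : Int)) (0 + (t : Int) + k - 1) 1).all
          (fun j => PySem.List.pyGetD xs j 0 < PySem.List.pyGetD xs (j + 1) 0))
        = (((xs.zip xs.tail).drop t).take d).all (fun q => q.1 < q.2) := by
    intro t htm
    have htlt : t < (xs.zip xs.tail).length + 1 - d := List.mem_range.mp htm
    have ht : t + d ≤ (xs.zip xs.tail).length := by omega
    simp only [zero_add]
    exact inner_eq xs k d t hd ht
  have hq := List.countP_congr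
      (l := List.range ((xs.zip xs.tail).length + 1 - d))
      (p := fun (t : Nat) => (PySem.List.pyRange (0 + (t : Int)) (0 + (t : Int) + k - 1) 1).all
          (fun j => PySem.List.pyGetD xs j 0 < PySem.List.pyGetD xs (j + 1) 0))
      (q := fun (t : Nat) => (((xs.zip xs.tail).drop t).take d).all (fun q => q.1 < q.2))
      (fun t ht => by simp only [hmem t ht])
  rw [pv_foldl_count, hq, countP_range_eq_countB d (by omega) (xs.zip xs.tail), zero_add]

-- ===== VERDICT (by name: the statement is the Claim_ definition above) =====
theorem highlyProfitableMonths_spec : Claim_equal_highlyProfitableMonths := by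
  intro xs k _
  unfold Spec_highlyProfitableMonths highlyProfitableMonths
  rw [go_eq_countA xs k 1 0 0 (by omega)]
  simp only [Nat.sub_self, List.drop_zero]
  by_cases hk : k < 2
  · rw [countA_small k hk (xs.zip xs.tail) 0 0 le_rfl]
    unfold highlyProfitableMonths_alt
    rw [if_pos hk]
  · have hk2 : 2 ≤ k := by omega
    have hd : (((k - 1).toNat : Nat) : Int) = k - 1 := by omega
    have h1 := countA_eq_foldW k hk2 (xs.zip xs.tail) 0 0 le_rfl
    rw [show min (0 : Int) (k - 2) = 0 from by omega] at h1
    rw [h1, foldW_eq k hk2 (k - 1).toNat hd (xs.zip xs.tail)]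
    rw [alt_eq_countB xs k hk2 (k - 1).toNat hd]
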